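-- pv_equiv track=rewrite | github.com/EBI-Metagenomics/microeuks-gene-benchmarker | scripts/count_exons.py | merge_exon_counts
-- ===== SOURCE A (Python) =====
-- def merge_exon_counts(exon_counter):
--     merged_counts = {}
--
--     # Get a list of all unique exon numbers across all files
--     all_exon_numbers = set()
--     for exon_counts in exon_counter:
--         all_exon_numbers.update(exon_counts.keys())
--
--     # Initialize merged counts with zero for each exon number
--     for exon_number in all_exon_numbers:
--         merged_counts[exon_number] = [0] * len(exon_counter)
--
--     # Fill in counts for each exon number in each file
--     for idx, exon_counts in enumerate(exon_counter):
--         for exon_number, count in exon_counts.items():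
--             merged_counts[exon_number][idx] = count
--
--     return merged_counts
-- ===== SOURCE B (Python) =====
-- def merge_exon_counts(exon_counter):
--     # Same unique-exon set as A (same iteration order), then one gather
--     # comprehension per exon instead of zero-init + scatter writes.
--     all_exon_numbers = set()
--     for exon_counts in exon_counter:
--         all_exon_numbers.update(exon_counts.keys())
--     return {
--         exon_number: [exon_counts.get(exon_number, 0) for exon_counts in exon_counter]
--         for exon_number in all_exon_numbers
--     }
-- ===== Notes on version B (the rewrite author's own statement) =====
-- stated objective: simpler
-- what changed: A zero-initializes a row per exon and then scatter-writes counts file-by-file into the rows; B builds each row directly with an exon-outer/file-inner gather using dict.get, as one dict comprehension with no initialization pass.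
import Mathlib
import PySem

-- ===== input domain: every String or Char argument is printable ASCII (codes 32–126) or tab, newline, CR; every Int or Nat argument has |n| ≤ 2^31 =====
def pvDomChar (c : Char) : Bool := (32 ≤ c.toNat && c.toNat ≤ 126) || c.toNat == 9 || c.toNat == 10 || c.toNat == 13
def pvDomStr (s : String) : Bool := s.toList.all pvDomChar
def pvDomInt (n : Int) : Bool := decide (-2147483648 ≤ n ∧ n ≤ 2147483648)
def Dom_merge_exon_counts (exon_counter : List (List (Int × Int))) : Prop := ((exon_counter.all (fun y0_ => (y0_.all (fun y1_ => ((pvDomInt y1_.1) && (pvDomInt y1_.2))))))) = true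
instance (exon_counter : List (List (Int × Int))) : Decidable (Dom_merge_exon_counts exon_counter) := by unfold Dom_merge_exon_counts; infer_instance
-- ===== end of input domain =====

-- B replaces A's zero-init + file-by-file scatter writes by a per-exon gather with dict.get (simpler; return value only, A mutates nothing observable).

-- ===== PORT A =====
-- inner loop 'for exon_number, count in exon_counts.items(): merged_counts[exon_number][idx] = count';
-- the total forms getD/pySetD are exact here: the key is always present and idx < len(row), so Python never raises
def pvFillFile (idx : Int) (d : PySem.Dict Int Int) (m : PySem.Dict Int (List Int)) : PySem.Dict Int (List Int) :=
  d.items.foldl (fun m q => m.insert q.1 (PySem.List.pySetD (m.getD q.1 []) idx q.2)) m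

def merge_exon_counts (exon_counter : List (List (Int × Int))) : List (Int × List Int) :=
  let all_exon_numbers : PySem.Set Int :=
    exon_counter.foldl (fun s d => PySem.Set.update s (PySem.Dict.ofList d).keys) PySem.Set.empty
  let merged0 : PySem.Dict Int (List Int) :=
    all_exon_numbers.foldl (fun m k => m.insert k (List.replicate exon_counter.length (0 : Int))) PySem.Dict.empty
  let merged : PySem.Dict Int (List Int) :=
    (PySem.List.enumerate exon_counter 0).foldl (fun m p => pvFillFile p.1 (PySem.Dict.ofList p.2) m) merged0
  merged.items

-- ===== PORT B =====
def merge_exon_counts_alt (exon_counter : List (List (Int × Int))) : List (Int × List Int) :=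
  let all_exon_numbers : PySem.Set Int :=
    exon_counter.foldl (fun s d => PySem.Set.update s (PySem.Dict.ofList d).keys) PySem.Set.empty
  all_exon_numbers.map (fun k => (k, exon_counter.map (fun d => (PySem.Dict.ofList d).getD k 0)))

-- ===== PRECONDITION & SPEC =====
def Spec_merge_exon_counts (exon_counter : List (List (Int × Int))) (out : List (Int × List Int)) : Prop := out = merge_exon_counts_alt exon_counter
instance (exon_counter : List (List (Int × Int))) (out : List (Int × List Int)) : Decidable (Spec_merge_exon_counts exon_counter out) := by unfold Spec_merge_exon_counts; infer_instance

-- ===== CLAIM (what is proved, stated in full; the proofs are below) =====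
def Claim_equal_merge_exon_counts : Prop := ∀ (exon_counter : List (List (Int × Int))), Dom_merge_exon_counts exon_counter → Spec_merge_exon_counts exon_counter (merge_exon_counts exon_counter)

-- ===== LEMMAS AND PROOFS =====

-- a Set.update by elements already present is the identity
theorem pvSetUpdateOfSubset (s : PySem.Set Int) (l : List Int) (h : ∀ x ∈ l, x ∈ s) :
    PySem.Set.update s l = s := by
  induction l generalizing s with
  | nil => rfl
  | cons x t ih =>
    show PySem.Set.update (PySem.Set.add s x) t = s
    rw [PySem.Set.add_of_mem (h x (by simp))]
    exact ih s fun y hy => h y (by simp [hy])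

-- the collected exon-number set, as the proofs refer to it
def pvAllK (exon_counter : List (List (Int × Int))) : PySem.Set Int :=
  exon_counter.foldl (fun s d => PySem.Set.update s (PySem.Dict.ofList d).keys) PySem.Set.empty

theorem pvMemFoldUpdate (ec : List (List (Int × Int))) (s : PySem.Set Int) (x : Int) (hx : x ∈ s) :
    x ∈ ec.foldl (fun s d => PySem.Set.update s (PySem.Dict.ofList d).keys) s := by
  induction ec generalizing s with
  | nil => exact hx
  | cons d t ih =>
    simp only [List.foldl_cons]
    exact ih _ ((PySem.Set.mem_update _ _ _).2 (Or.inl hx))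

theorem pvKeysSubAllK (ec : List (List (Int × Int))) (s : PySem.Set Int) (d : List (Int × Int))
    (hd : d ∈ ec) (x : Int) (hx : x ∈ (PySem.Dict.ofList d).keys) :
    x ∈ ec.foldl (fun s d => PySem.Set.update s (PySem.Dict.ofList d).keys) s := by
  induction ec generalizing s with
  | nil => cases hd
  | cons e t ih =>
    simp only [List.foldl_cons]
    rcases List.mem_cons.1 hd with rfl | hd
    · exact pvMemFoldUpdate _ _ _ ((PySem.Set.mem_update _ _ _).2 (Or.inr hx))
    · exact ih _ hd

theorem pvNodupAllK (ec : List (List (Int × Int))) (s : PySem.Set Int) (hs : s.Nodup) :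
    (ec.foldl (fun s d => PySem.Set.update s (PySem.Dict.ofList d).keys) s).Nodup := by
  induction ec generalizing s with
  | nil => exact hs
  | cons d t ih => exact ih _ (PySem.Set.nodup_update _ _ hs)

-- the inner scatter loop, looked up at a key none of the entries touches
theorem pvFillGetDNotMem (idx : Int) (l : List (Int × Int)) (m : PySem.Dict Int (List Int)) (k : Int)
    (h : ∀ q ∈ l, q.1 ≠ k) :
    (l.foldl (fun m q => m.insert q.1 (PySem.List.pySetD (m.getD q.1 []) idx q.2)) m).getD k []
      = m.getD k [] := by
  induction l generalizing m with
  | nil => rfl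
  | cons q t ih =>
    simp only [List.foldl_cons]
    rw [ih _ (fun p hp => h p (by simp [hp]))]
    exact PySem.Dict.getD_insert_of_ne _ _ _ (fun he => h q (by simp) he.symm)

-- the inner scatter loop, looked up at the key of one of its entries (keys distinct)
theorem pvFillGetDMem (idx : Int) (l : List (Int × Int)) (m : PySem.Dict Int (List Int)) (k : Int)
    (v : Int) (hnd : (l.map Prod.fst).Nodup) (hmem : (k, v) ∈ l) :
    (l.foldl (fun m q => m.insert q.1 (PySem.List.pySetD (m.getD q.1 []) idx q.2)) m).getD k []
      = PySem.List.pySetD (m.getD k []) idx v := by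
  induction l generalizing m with
  | nil => cases hmem
  | cons q t ih =>
    simp only [List.map_cons, List.nodup_cons] at hnd
    simp only [List.foldl_cons]
    rcases List.mem_cons.1 hmem with rfl | hmem
    · rw [pvFillGetDNotMem]
      · exact PySem.Dict.getD_insert_self _ _ _ _
      · intro p hp he
        exact hnd.1 (he ▸ List.mem_map.mpr ⟨p, hp, rfl⟩)
    · have hk : k ≠ q.1 := by
        intro he
        exact hnd.1 (he ▸ List.mem_map.mpr ⟨(k, v), hmem, rfl⟩)
      rw [ih _ hnd.2 hmem, PySem.Dict.getD_insert_of_ne _ _ _ hk]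

-- one file's scatter pass rewrites the row at k to row.set idx (file.getD k 0)
theorem pvFillFileRow (j : Nat) (d : List (Int × Int)) (m : PySem.Dict Int (List Int)) (k : Int)
    (h0 : (m.getD k [])[j]? = some 0) :
    (pvFillFile (j : Int) (PySem.Dict.ofList d) m).getD k []
      = (m.getD k []).set j ((PySem.Dict.ofList d).getD k 0) := by
  by_cases hk : k ∈ (PySem.Dict.ofList d).keys
  · obtain ⟨v, hv⟩ : ∃ v, (PySem.Dict.ofList d).get? k = some v := by
      rcases hw : (PySem.Dict.ofList d).get? k with _ | v
      · exact absurd ((PySem.Dict.get?_eq_none_iff_not_mem_keys _ _).1 hw) (not_not.2 hk)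
      · exact ⟨v, rfl⟩
    have hvD : (PySem.Dict.ofList d).getD k 0 = v := by
      rw [PySem.Dict.getD_eq_get?_getD, hv]; rfl
    have hmem : (k, v) ∈ (PySem.Dict.ofList d).items :=
      (PySem.Dict.get?_eq_some_iff_mem_items _ _ _ (PySem.Dict.nodup_keys_ofList d)).1 hv
    have hnd : ((PySem.Dict.ofList d).items.map Prod.fst).Nodup :=
      PySem.Dict.nodup_keys_ofList d
    rw [pvFillFile, pvFillGetDMem _ _ _ _ v hnd hmem, hvD, PySem.List.pySetD_natCast]
  · have hz : (PySem.Dict.ofList d).getD k 0 = 0 := by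
      rw [PySem.Dict.getD_eq_get?_getD, (PySem.Dict.get?_eq_none_iff_not_mem_keys _ _).2 hk]; rfl
    rw [pvFillFile, pvFillGetDNotMem, hz]
    · have hj : j < (m.getD k []).length := (List.getElem?_eq_some_iff.1 h0).1
      have hg : (m.getD k [])[j] = 0 := by
        rw [List.getElem?_eq_getElem hj] at h0
        exact Option.some_injective _ h0
      rw [← hg, List.set_getElem_self]
    · intro q hq he
      exact hk (he ▸ PySem.Dict.mem_keys_of_mem_items _ hq)

theorem pvTakeSuccSet (xs : List Int) (j : Nat) (v : Int) (hj : j < xs.length) :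
    (xs.set j v).take (j + 1) = xs.take j ++ [v] := by
  rw [List.take_add_one, List.take_set,
      List.set_eq_of_length_le (List.length_take_le j xs), List.getElem?_set_self hj]
  rfl

-- the whole fill phase turns each row into the per-file gather
theorem pvFillRows (fs : List (List (Int × Int))) (j : Nat) (m : PySem.Dict Int (List Int)) (k : Int)
    (hlen : (m.getD k []).length = j + fs.length)
    (hdrop : (m.getD k []).drop j = List.replicate fs.length (0 : Int)) :
    ((PySem.List.enumerate fs (j : Int)).foldl
        (fun m p => pvFillFile p.1 (PySem.Dict.ofList p.2) m) m).getD k []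
      = (m.getD k []).take j ++ fs.map (fun d => (PySem.Dict.ofList d).getD k 0) := by
  induction fs generalizing j m with
  | nil =>
    simp only [PySem.List.enumerate_nil, List.foldl_nil, List.map_nil, List.append_nil]
    rw [List.length_nil, Nat.add_zero] at hlen
    exact (List.take_of_length_le (by omega)).symm
  | cons d t ih =>
    have hj : j < (m.getD k []).length := by rw [hlen, List.length_cons]; omega
    have h0 : (m.getD k [])[j]? = some 0 := by
      have h := congrArg (fun l : List Int => l[0]?) hdrop
      simp only [List.getElem?_drop, Nat.add_zero] at h
      simpa using h
    rw [PySem.List.enumerate_cons, List.foldl_cons]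
    have hrow := pvFillFileRow j d m k h0
    have hcast : (j : Int) + 1 = ((j + 1 : Nat) : Int) := by push_cast; ring
    rw [hcast, ih (j + 1) _
        (by rw [hrow, List.length_set, hlen, List.length_cons]; omega)
        (by rw [hrow, List.drop_set_of_lt (by omega), ← List.tail_drop, hdrop,
                List.length_cons, List.replicate_succ, List.tail_cons]),
      hrow, pvTakeSuccSet _ _ _ hj]
    simp

-- the zero-initialization pass, as items
theorem pvInitItems (ec : List (List (Int × Int))) :
    ((pvAllK ec).foldl (fun m k => m.insert k (List.replicate ec.length (0 : Int)))
        PySem.Dict.empty).items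
      = (pvAllK ec).map (fun k => (k, List.replicate ec.length (0 : Int))) := by
  rw [PySem.Dict.items_foldl_insert_fresh (pvAllK ec) (fun x => x)
      (fun _ => List.replicate ec.length (0 : Int)) PySem.Dict.empty
      (fun _ _ => PySem.Dict.contains_empty _)
      (by simpa using pvNodupAllK ec PySem.Set.empty List.nodup_nil)]
  rfl

-- the fill phase only writes to existing keys, so the key list is unchanged
theorem pvFillKeys (l : List (Int × List (Int × Int))) (m : PySem.Dict Int (List Int))
    (h : ∀ p ∈ l, ∀ x ∈ (PySem.Dict.ofList p.2).keys, x ∈ m.keys) :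
    (l.foldl (fun m p => pvFillFile p.1 (PySem.Dict.ofList p.2) m) m).keys = m.keys := by
  induction l generalizing m with
  | nil => rfl
  | cons p t ih =>
    simp only [List.foldl_cons]
    have hk : (pvFillFile p.1 (PySem.Dict.ofList p.2) m).keys = m.keys := by
      rw [pvFillFile, PySem.Dict.keys_foldl_insert_key]
      exact pvSetUpdateOfSubset _ _ (h p (by simp))
    rw [ih _ (by rw [hk]; exact fun q hq => h q (List.mem_cons_of_mem _ hq)), hk]

theorem pv_main (ec : List (List (Int × Int))) :
    merge_exon_counts ec = merge_exon_counts_alt ec := by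
  simp only [merge_exon_counts, merge_exon_counts_alt]
  rw [← pvAllK]
  have hm0items := pvInitItems ec
  set allK := pvAllK ec with hallK
  set m0 := allK.foldl (fun m k => m.insert k (List.replicate ec.length (0 : Int)))
      PySem.Dict.empty with hm0
  have hnodup : allK.Nodup := pvNodupAllK ec PySem.Set.empty List.nodup_nil
  have hm0keys : m0.keys = allK := by
    show m0.items.map Prod.fst = allK
    rw [hm0items, List.map_map]
    simp [Function.comp_def]
  set merged := (PySem.List.enumerate ec 0).foldl
      (fun m p => pvFillFile p.1 (PySem.Dict.ofList p.2) m) m0 with hmerged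
  have hsub : ∀ p ∈ PySem.List.enumerate ec 0, ∀ x ∈ (PySem.Dict.ofList p.2).keys, x ∈ m0.keys := by
    intro p hp x hx
    rw [hm0keys]
    have hp2 : p.2 ∈ ec := by
      have := PySem.List.map_snd_enumerate ec 0
      rw [← this]
      exact List.mem_map.mpr ⟨p, hp, rfl⟩
    exact pvKeysSubAllK ec PySem.Set.empty p.2 hp2 x hx
  have hkeys : merged.keys = allK := by rw [hmerged, pvFillKeys _ _ hsub, hm0keys]
  have hrow : ∀ k ∈ allK, merged.getD k [] = ec.map (fun d => (PySem.Dict.ofList d).getD k 0) := by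
    intro k hk
    have hm0g : m0.getD k [] = List.replicate ec.length (0 : Int) := by
      refine PySem.Dict.getD_of_mem_items m0 ?_ (hm0keys ▸ hnodup) []
      rw [hm0items]
      exact List.mem_map.mpr ⟨k, hk, rfl⟩
    have h := pvFillRows ec 0 m0 k (by rw [hm0g]; simp) (by rw [hm0g]; rfl)
    rw [Nat.cast_zero] at h
    rw [hmerged, h, hm0g]
    rfl
  rw [PySem.Dict.items_eq_map_keys merged (hkeys ▸ hnodup) [], hkeys]
  exact List.map_congr_left fun k hk => by rw [hrow k hk]

-- ===== VERDICT (by name: the statement is the Claim_ definition above) =====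
theorem merge_exon_counts_spec : Claim_equal_merge_exon_counts := by
  intro ec _
  show merge_exon_counts ec = merge_exon_counts_alt ec
  exact pv_main ec
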